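-- pv_equiv track=rewrite | github.com/ChrisB2025/MMT-Budget-Day-Response-Suite | apps/article_critique/extractors.py | detect_paywall_in_content
-- ===== SOURCE A (Python) =====
-- PAYWALL_INDICATORS = [
--     'subscribe to read',
--     'subscription required',
--     'premium content',
--     'members only',
--     'to continue reading',
--     'sign up to read',
--     'register to continue',
--     'unlock this article',
--     'exclusive content',
--     'join to read',
--     'become a member',
--     'subscriber exclusive',
--     'for subscribers only',
--     'start your free trial',
--     'already a subscriber',
-- ]
--
-- def detect_paywall_in_content(text: str) -> bool:
--     """Check if extracted content indicates a paywall."""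
--     text_lower = text.lower()
--
--     for indicator in PAYWALL_INDICATORS:
--         if indicator in text_lower:
--             # Make sure we're not just matching in a byline or sidebar
--             # Check if it's prominent (appears early in content)
--             position = text_lower.find(indicator)
--             if position < 500:  # Found in first 500 chars
--                 return True
--
--     # Also check if content is suspiciously short
--     if len(text.strip()) < 300:
--         return True
--
--     return False
-- ===== SOURCE B (Python) =====
-- PAYWALL_INDICATORS = [
--     'subscribe to read',
--     'subscription required',
--     'premium content',
--     'members only',
--     'to continue reading',
--     'sign up to read',
--     'register to continue',
--     'unlock this article',
--     'exclusive content',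
--     'join to read',
--     'become a member',
--     'subscriber exclusive',
--     'for subscribers only',
--     'start your free trial',
--     'already a subscriber',
-- ]
--
-- def detect_paywall_in_content(text: str) -> bool:
--     """Check if extracted content indicates a paywall."""
--     text_lower = text.lower()
--     # Position-driven scan: walk the first 500 character positions once and
--     # ask, at each position, whether some indicator starts exactly there.
--     for i in range(min(len(text_lower), 500)):
--         for ind in PAYWALL_INDICATORS:
--             if text_lower.startswith(ind, i):
--                 return True
--     return len(text.strip()) < 300
-- ===== Notes on version B (the rewrite author's own statement) =====
-- stated objective: alternative
-- what changed: A loops over the fifteen indicators, each doing a full-text membership scan plus a second full-text find scan before testing the position; B inverts the traversal: a single position-driven scan over the first 500 character positions that asks at each position whether some indicator starts there (naive multi-pattern matching on a bounded window), then returns the strip-length comparison directly.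
import Mathlib
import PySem

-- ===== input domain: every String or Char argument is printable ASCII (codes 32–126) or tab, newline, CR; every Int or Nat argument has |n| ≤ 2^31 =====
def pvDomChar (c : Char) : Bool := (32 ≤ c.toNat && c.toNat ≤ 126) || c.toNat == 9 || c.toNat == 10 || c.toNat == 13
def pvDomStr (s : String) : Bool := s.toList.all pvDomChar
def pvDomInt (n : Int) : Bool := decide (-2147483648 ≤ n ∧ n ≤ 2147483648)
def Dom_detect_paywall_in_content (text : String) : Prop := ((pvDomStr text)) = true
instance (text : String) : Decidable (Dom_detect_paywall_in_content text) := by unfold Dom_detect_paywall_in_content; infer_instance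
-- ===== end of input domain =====

-- B inverts A's traversal: instead of one full-text scan per indicator, a single
-- position-driven scan of the first 500 positions asking whether some indicator
-- starts at each position (an alternative algorithm; indicator matching stays in the window).

def pvPAYWALL_INDICATORS : List String := [
  "subscribe to read",
  "subscription required",
  "premium content",
  "members only",
  "to continue reading",
  "sign up to read",
  "register to continue",
  "unlock this article",
  "exclusive content",
  "join to read",
  "become a member",
  "subscriber exclusive",
  "for subscribers only",
  "start your free trial",
  "already a subscriber"]

-- ===== PORT A =====
-- A's for-loop with early return: 'if indicator in text_lower: if text_lower.find(indicator) < 500: return True'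
def pvLoopA (tl : List Char) : List String → Bool
  | [] => false
  | ind :: rest =>
    if PySem.Chars.isIn ind.toList tl then
      (if PySem.Chars.find tl ind.toList < 500 then true else pvLoopA tl rest)
    else pvLoopA tl rest

def detect_paywall_in_content (text : String) : Bool :=
  let text_lower := PySem.Chars.lower text.toList
  if pvLoopA text_lower pvPAYWALL_INDICATORS then true
  else if (PySem.Chars.strip text.toList).length < 300 then true
  else false

-- ===== PORT B =====
-- text_lower.startswith(ind, i) with 0 ≤ i ≤ len is exactly 'ind is a prefix of text_lower[i:]'
def detect_paywall_in_content_alt (text : String) : Bool :=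
  let text_lower := PySem.Chars.lower text.toList
  if (List.range (min text_lower.length 500)).any (fun i =>
      pvPAYWALL_INDICATORS.any (fun ind =>
        PySem.Chars.startswith (text_lower.drop i) ind.toList)) then true
  else decide ((PySem.Chars.strip text.toList).length < 300)

-- ===== PRECONDITION & SPEC =====
def Spec_detect_paywall_in_content (text : String) (out : Bool) : Prop := out = detect_paywall_in_content_alt text
instance (text : String) (out : Bool) : Decidable (Spec_detect_paywall_in_content text out) := by unfold Spec_detect_paywall_in_content; infer_instance

-- ===== CLAIM (what is proved, stated in full; the proofs are below) =====
def Claim_equal_detect_paywall_in_content : Prop := ∀ (text : String), Dom_detect_paywall_in_content text → Spec_detect_paywall_in_content text (detect_paywall_in_content text)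

-- ===== LEMMAS AND PROOFS =====

-- a nonempty pattern starts at some position i < min(len,500) iff it occurs in tl with first occurrence before 500
lemma pv_pos_iff (tl sub : List Char) (h : sub ≠ []) :
    (∃ i, i < min tl.length 500 ∧ sub <+: tl.drop i)
      ↔ (PySem.Chars.isIn sub tl = true ∧ PySem.Chars.find tl sub < 500) := by
  constructor
  · rintro ⟨i, hi, hp⟩
    have hin : PySem.Chars.isIn sub tl = true :=
      (PySem.Chars.exists_prefix_drop_iff_isIn sub tl).mp ⟨i, hp⟩
    have hf0 : 0 ≤ PySem.Chars.find tl sub := (PySem.Chars.find_nonneg_iff tl sub).mpr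
      ((PySem.Chars.isIn_iff_infix sub tl).mp hin)
    obtain ⟨_, hmin⟩ := PySem.Chars.find_spec (s := tl) (sub := sub) hf0
    have hle : (PySem.Chars.find tl sub).toNat ≤ i := by
      by_contra hlt
      exact hmin i (by omega) hp
    exact ⟨hin, by omega⟩
  · rintro ⟨hin, hlt⟩
    have hf0 : 0 ≤ PySem.Chars.find tl sub := (PySem.Chars.find_nonneg_iff tl sub).mpr
      ((PySem.Chars.isIn_iff_infix sub tl).mp hin)
    obtain ⟨hocc, _⟩ := PySem.Chars.find_spec (s := tl) (sub := sub) hf0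
    refine ⟨(PySem.Chars.find tl sub).toNat, ?_, hocc⟩
    have hne : tl.drop (PySem.Chars.find tl sub).toNat ≠ [] := by
      intro hnil
      rw [hnil] at hocc
      exact h (List.prefix_nil.mp hocc)
    have : (PySem.Chars.find tl sub).toNat < tl.length := by
      by_contra hge
      exact hne (List.drop_eq_nil_iff.mpr (by omega))
    omega

-- A's early-return loop equals 'some indicator occurs with first occurrence before 500'
lemma pv_loopA_iff (tl : List Char) (inds : List String) :
    pvLoopA tl inds = true
      ↔ ∃ ind ∈ inds, PySem.Chars.isIn ind.toList tl = true ∧ PySem.Chars.find tl ind.toList < 500 := by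
  induction inds with
  | nil => simp [pvLoopA]
  | cons ind rest ih =>
    simp only [pvLoopA]
    split_ifs with h1 h2
    · constructor
      · intro _
        exact ⟨ind, List.mem_cons_self, h1, h2⟩
      · intro _
        rfl
    · rw [ih]
      constructor
      · rintro ⟨x, hm, hx⟩
        exact ⟨x, List.mem_cons_of_mem _ hm, hx⟩
      · rintro ⟨x, hor, hx⟩
        rcases List.mem_cons.mp hor with rfl | hm
        · exact absurd hx.2 h2
        · exact ⟨x, hm, hx⟩
    · rw [ih]
      constructor
      · rintro ⟨x, hm, hx⟩
        exact ⟨x, List.mem_cons_of_mem _ hm, hx⟩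
      · rintro ⟨x, hor, hx⟩
        rcases List.mem_cons.mp hor with rfl | hm
        · exact absurd hx.1 h1
        · exact ⟨x, hm, hx⟩

-- every indicator is a nonempty string
lemma pv_inds_ne_nil : ∀ ind ∈ pvPAYWALL_INDICATORS, ind.toList ≠ [] := by decide

-- A's indicator loop and B's position scan decide the same condition
lemma pv_cond_iff (tl : List Char) :
    pvLoopA tl pvPAYWALL_INDICATORS = true
      ↔ ((List.range (min tl.length 500)).any (fun i =>
           pvPAYWALL_INDICATORS.any (fun ind =>
             PySem.Chars.startswith (tl.drop i) ind.toList)) = true) := by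
  rw [pv_loopA_iff]
  simp only [List.any_eq_true, List.mem_range, PySem.Chars.startswith_iff]
  constructor
  · rintro ⟨ind, hm, hx⟩
    obtain ⟨i, hi, hp⟩ := (pv_pos_iff tl ind.toList (pv_inds_ne_nil ind hm)).mpr hx
    exact ⟨i, hi, ind, hm, hp⟩
  · rintro ⟨i, hi, ind, hm, hp⟩
    exact ⟨ind, hm, (pv_pos_iff tl ind.toList (pv_inds_ne_nil ind hm)).mp ⟨i, hi, hp⟩⟩

-- ===== VERDICT (by name: the statement is the Claim_ definition above) =====
theorem detect_paywall_in_content_spec : Claim_equal_detect_paywall_in_content := by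
  intro text _
  unfold Spec_detect_paywall_in_content detect_paywall_in_content detect_paywall_in_content_alt
  simp only
  by_cases hA : pvLoopA (PySem.Chars.lower text.toList) pvPAYWALL_INDICATORS = true
  · have hB := (pv_cond_iff _).mp hA
    simp [hA, hB]
  · have hB : ¬ ((List.range (min (PySem.Chars.lower text.toList).length 500)).any (fun i =>
        pvPAYWALL_INDICATORS.any (fun ind =>
          PySem.Chars.startswith ((PySem.Chars.lower text.toList).drop i) ind.toList)) = true) :=
      fun h => hA ((pv_cond_iff _).mpr h)
    simp only [Bool.not_eq_true] at hA hB
    simp only [hA, hB, Bool.false_eq_true, if_false]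
    by_cases hs : (PySem.Chars.strip text.toList).length < 300 <;> simp [hs]
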